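-- pv_equiv track=rewrite | github.com/sdamashek/codejam | 1c-2009-A/1c-2009-A.py | attempt_base
-- ===== SOURCE A (Python) =====
-- def attempt_base(s, base):
--     available = list(range(base))
--     result = 0
--     mapping = dict()
--
--     ind = len(s)-1 # base is zero indexed
--
--     sl = list(s)
--     # Assign first character
--     first = sl.pop(0)
--     available.remove(1)
--     result += base**ind
--     mapping[first] = 1
--     ind -= 1
--
--     for char in sl:
--         if char in mapping:
--             result += mapping[char] * base**ind
--         else:
--             val = available.pop(0)
--             mapping[char] = val
--             result += val * base**ind
--
--         ind -= 1
--
--     return result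
-- ===== SOURCE B (Python) =====
-- def attempt_base(s, base):
--     # Horner's method: one pass, no exponentiation; digit values assigned on
--     # first sight: first char -> 1, second distinct -> 0, n-th distinct -> n-1.
--     mapping = {}
--     result = 0
--     for ch in s:
--         if ch not in mapping:
--             n = len(mapping)
--             val = 1 if n == 0 else (0 if n == 1 else n)
--             if val >= base:
--                 raise ValueError("no digit %d in base %d" % (val, base))
--             mapping[ch] = val
--         result = result * base + mapping[ch]
--     return result
-- ===== Notes on version B (the rewrite author's own statement) =====
-- stated objective: faster
-- what changed: B replaces A's per-position base**ind exponentiation and the pop-from-a-digit-pool list with a single left-to-right Horner pass (result = result*base + digit) that derives each fresh digit from the current mapping size.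
import Mathlib
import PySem

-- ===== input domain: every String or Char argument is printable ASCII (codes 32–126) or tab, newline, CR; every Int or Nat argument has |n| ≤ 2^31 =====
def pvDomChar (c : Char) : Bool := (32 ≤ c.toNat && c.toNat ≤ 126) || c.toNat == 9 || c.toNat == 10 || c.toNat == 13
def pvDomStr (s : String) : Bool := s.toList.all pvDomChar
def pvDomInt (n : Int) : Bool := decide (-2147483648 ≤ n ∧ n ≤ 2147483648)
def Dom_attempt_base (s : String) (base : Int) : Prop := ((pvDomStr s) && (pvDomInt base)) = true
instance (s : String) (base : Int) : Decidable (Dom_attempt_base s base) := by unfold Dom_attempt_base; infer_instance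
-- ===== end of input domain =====

-- B replaces A's per-position exponentiation and pop-from-a-list digit pool by a single
-- Horner pass (result = result*base + digit) with the next fresh digit computed from the
-- mapping's size; equivalence of the RETURN value is proved on Pre_ (where A returns).

-- ===== PORT A =====
def attempt_base (s : String) (base : Int) : Int :=
  let available := PySem.List.pyRange 0 base 1
  let mapping : PySem.Dict Char Int := PySem.Dict.empty
  let ind : Int := PySem.Str.len s - 1
  match s.toList with
  | [] => 0  -- sl.pop(0) raises IndexError here; excluded by Pre_
  | first :: sl =>
    -- available.remove(1): none = ValueError (base < 2); excluded by Pre_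
    let available := (PySem.List.remove? available 1).getD []
    let result : Int := 0 + base ^ ind.toNat  -- base**ind; ind ≥ 0 whenever s ≠ ""
    let mapping := mapping.insert first 1
    let ind := ind - 1
    (sl.foldl (fun (st : Int × PySem.Dict Char Int × List Int × Int) char =>
      match st with
      | (result, mapping, available, ind) =>
        if mapping.contains char then
          (result + mapping.getD char 0 * base ^ ind.toNat, mapping, available, ind - 1)
        else
          match available with
          | [] => (result, mapping, available, ind - 1)  -- pop(0) raises IndexError; excluded by Pre_
          | val :: rest =>
            (result + val * base ^ ind.toNat, mapping.insert char val, rest, ind - 1))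
      (result, mapping, available, ind)).1

-- ===== PORT B =====
def attempt_base_alt (s : String) (base : Int) : Int :=
  (s.toList.foldl (fun (st : Int × PySem.Dict Char Int) ch =>
    match st with
    | (result, mapping) =>
      let mapping :=
        if mapping.contains ch then mapping
        else
          let n := mapping.size
          let val : Int := if n == 0 then 1 else if n == 1 then 0 else (n : Int)
          -- `val >= base` raises ValueError (no such digit); excluded by Pre_
          if base ≤ val then mapping
          else mapping.insert ch val
      (result * base + mapping.getD ch 0, mapping))
    (0, PySem.Dict.empty)).1

-- ===== PRECONDITION & SPEC =====
-- Pre_ = exactly the inputs on which A returns: s nonempty (pop(0)), base ≥ 2 (remove(1)),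
-- and at most `base` distinct characters (available.pop(0)); elsewhere A raises.
def Pre_attempt_base (s : String) (base : Int) : Prop :=
  s.toList ≠ [] ∧ 2 ≤ base ∧ (s.toList.toFinset.card : Int) ≤ base
instance (s : String) (base : Int) : Decidable (Pre_attempt_base s base) := by
  unfold Pre_attempt_base; infer_instance
def pvWitness_attempt_base : String × Int := ("sends", 10)

def Spec_attempt_base (s : String) (base : Int) (out : Int) : Prop := out = attempt_base_alt s base
instance (s : String) (base : Int) (out : Int) : Decidable (Spec_attempt_base s base out) := by
  unfold Spec_attempt_base; infer_instance

-- ===== CLAIM (what is proved, stated in full; the proofs are below) =====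
def Claim_equal_attempt_base : Prop := ∀ (s : String) (base : Int), Dom_attempt_base s base → Pre_attempt_base s base → Spec_attempt_base s base (attempt_base s base)

-- ===== LEMMAS AND PROOFS =====

-- A's remaining digit pool after k characters have been assigned (k ≥ 1).
def pvAvail (base : Int) (k : Nat) : List Int :=
  if k = 1 then 0 :: PySem.List.pyRange 2 base 1 else PySem.List.pyRange (k : Int) base 1

lemma pv_loop (base : Int) :
    ∀ (cs : List Char) (resB : Int) (mapping : PySem.Dict Char Int) (k : Nat),
      mapping.keys.length = k → 1 ≤ k →
      ((cs.toFinset \ mapping.keys.toFinset).card : Int) ≤ base - k →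
      (cs.foldl (fun (st : Int × PySem.Dict Char Int × List Int × Int) char =>
        match st with
        | (result, mapping, available, ind) =>
          if mapping.contains char then
            (result + mapping.getD char 0 * base ^ ind.toNat, mapping, available, ind - 1)
          else
            match available with
            | [] => (result, mapping, available, ind - 1)
            | val :: rest =>
              (result + val * base ^ ind.toNat, mapping.insert char val, rest, ind - 1))
        (resB * base ^ cs.length, mapping, pvAvail base k, (cs.length : Int) - 1)).1
      = (cs.foldl (fun (st : Int × PySem.Dict Char Int) ch =>
          match st with
          | (result, mapping) =>
            let mapping :=
              if mapping.contains ch then mapping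
              else
                let n := mapping.size
                let val : Int := if n == 0 then 1 else if n == 1 then 0 else (n : Int)
                if base ≤ val then mapping
                else mapping.insert ch val
            (result * base + mapping.getD ch 0, mapping))
          (resB, mapping)).1 := by
  intro cs
  induction cs with
  | nil => intro resB mapping k hk h1 _; simp
  | cons c cs ih =>
    intro resB mapping k hk h1 hcard
    have hkeysnd : True := trivial
    by_cases hc : mapping.contains c
    · have hmem : c ∈ mapping.keys.toFinset := by
        rw [List.mem_toFinset]; exact (PySem.Dict.contains_iff_mem_keys mapping c).mp hc
      have hcard' : ((cs.toFinset \ mapping.keys.toFinset).card : Int) ≤ base - k := by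
        refine le_trans ?_ hcard
        have : (cs.toFinset \ mapping.keys.toFinset) ⊆ ((c :: cs).toFinset \ mapping.keys.toFinset) := by
          rw [List.toFinset_cons]
          exact Finset.sdiff_subset_sdiff (Finset.subset_insert _ _) (Finset.Subset.refl _)
        exact_mod_cast Finset.card_le_card this
      have := ih (resB * base + mapping.getD c 0) mapping k hk h1 hcard'
      simp only [List.foldl_cons, hc, if_true, List.length_cons] at *
      have e1 : resB * base ^ (cs.length + 1) + mapping.getD c 0 * base ^ (((cs.length : Int) + 1 - 1).toNat)
          = (resB * base + mapping.getD c 0) * base ^ cs.length := by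
        have : ((cs.length : Int) + 1 - 1).toNat = cs.length := by omega
        rw [this]; ring
      have e2 : ((cs.length : Int) + 1 - 1 - 1) = (cs.length : Int) - 1 := by ring
      rw [show ((cs.length + 1 : Nat) : Int) = (cs.length : Int) + 1 by push_cast; ring] at *
      rw [e1, e2]
      exact this
    · -- c is a new character
      have hcfalse : mapping.contains c = false := by
        cases h : mapping.contains c with
        | true => exact absurd h hc
        | false => rfl
      have hnotmem : c ∉ mapping.keys.toFinset := by
        rw [List.mem_toFinset]
        intro h
        exact hc ((PySem.Dict.contains_iff_mem_keys mapping c).mpr h)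
      have hkb : (k : Int) < base := by
        have hcm : c ∈ (c :: cs).toFinset \ mapping.keys.toFinset := by
          rw [Finset.mem_sdiff]
          exact ⟨by simp, hnotmem⟩
        have hpos := Finset.card_pos.mpr ⟨c, hcm⟩
        have : (1 : Int) ≤ ((c :: cs).toFinset \ mapping.keys.toFinset).card := by exact_mod_cast hpos
        linarith
      have havail : pvAvail base k = (if k = 1 then (0 : Int) else (k : Int)) :: pvAvail base (k + 1) := by
        by_cases h1' : k = 1
        · subst h1'; simp [pvAvail]
        · simp only [pvAvail, if_neg h1', if_neg (by omega : ¬ k + 1 = 1)]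
          rw [PySem.List.pyRange_one_cons hkb]
          push_cast
          simp
      have hsize : mapping.size = k := by
        have : mapping.size = mapping.keys.length := by
          simp [PySem.Dict.size, PySem.Dict.keys]
        omega
      have hkeys' : (mapping.insert c (if k = 1 then (0 : Int) else (k : Int))).keys = mapping.keys ++ [c] :=
        PySem.Dict.keys_insert_of_not_contains mapping _ hcfalse
      have hbval : (if mapping.size == 0 then (1 : Int) else if mapping.size == 1 then 0 else (mapping.size : Int))
          = (if k = 1 then (0 : Int) else (k : Int)) := by
        rw [hsize]
        by_cases h1' : k = 1
        · simp [h1']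
        · have : ¬ k = 0 := by omega
          simp [h1', this]
      set val : Int := if k = 1 then (0 : Int) else (k : Int) with hval
      have hvb : ¬ base ≤ val := by
        rw [hval]
        by_cases h1' : k = 1 <;> simp [h1'] <;> omega
      have hcard' : ((cs.toFinset \ (mapping.insert c val).keys.toFinset).card : Int) ≤ base - (k + 1) := by
        rw [hkeys']
        have e : cs.toFinset \ (mapping.keys ++ [c]).toFinset = (cs.toFinset \ mapping.keys.toFinset).erase c := by
          ext x
          simp only [Finset.mem_sdiff, List.mem_toFinset, List.mem_append, List.mem_singleton,
            Finset.mem_erase]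
          tauto
        rw [e]
        have e2 : insert c cs.toFinset \ mapping.keys.toFinset
            = insert c ((cs.toFinset \ mapping.keys.toFinset).erase c) := by
          ext x
          by_cases hx : x = c <;> simp [hx, hnotmem]
        rw [List.toFinset_cons, e2, Finset.card_insert_of_notMem (Finset.notMem_erase _ _)] at hcard
        have := hcard
        push_cast at this ⊢
        omega
      have hklen' : (mapping.insert c val).keys.length = k + 1 := by
        rw [hkeys', List.length_append, hk]; rfl
      have := ih (resB * base + val) (mapping.insert c val) (k + 1) hklen' (by omega) hcard'
      simp only [List.foldl_cons, hcfalse, Bool.false_eq_true, if_false, havail, List.length_cons,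
        hbval, if_neg hvb, PySem.Dict.getD_insert_self] at *
      have e1 : resB * base ^ (cs.length + 1) + val * base ^ (((cs.length : Int) + 1 - 1).toNat)
          = (resB * base + val) * base ^ cs.length := by
        have h2 : ((cs.length : Int) + 1 - 1).toNat = cs.length := by omega
        rw [h2]; ring
      have e2' : ((cs.length : Int) + 1 - 1 - 1) = (cs.length : Int) - 1 := by ring
      rw [show ((cs.length + 1 : Nat) : Int) = (cs.length : Int) + 1 by push_cast; ring] at *
      rw [e1, e2']
      exact this


-- ===== VERDICT (by name: the statement is the Claim_ definition above) =====
theorem attempt_base_spec : Claim_equal_attempt_base := by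
  intro s base _ hpre
  rcases hpre with ⟨hne, hb, hcard⟩
  unfold Spec_attempt_base attempt_base attempt_base_alt
  obtain ⟨first, rest, hs⟩ : ∃ a l, s.toList = a :: l := by
    cases h : s.toList with
    | nil => exact absurd h hne
    | cons a l => exact ⟨a, l, rfl⟩
  rw [hs]
  simp only [PySem.Str.len_eq, hs]
  have hav : (PySem.List.remove? (PySem.List.pyRange 0 base) 1).getD [] = pvAvail base 1 := by
    rw [PySem.List.pyRange_one_cons (by omega : (0 : Int) < base)]
    rw [PySem.List.pyRange_one_cons (by omega : (0 : Int) + 1 < base)]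
    norm_num
    rw [PySem.List.remove?_cons_of_ne _ (by norm_num : (0 : Int) ≠ 1)]
    rw [PySem.List.remove?_cons_self]
    simp [pvAvail]
  have hkeys1 : (PySem.Dict.empty.insert first (1 : Int)).keys = [first] := by
    rw [PySem.Dict.keys_insert_of_not_contains _ _ (by simp)]
    simp
  have hcard' : ((rest.toFinset \ (PySem.Dict.empty.insert first (1 : Int)).keys.toFinset).card : Int) ≤ base - 1 := by
    rw [hkeys1]
    rw [hs, List.toFinset_cons] at hcard
    have e2 : insert first rest.toFinset = insert first (rest.toFinset.erase first) := by
      ext x; by_cases hx : x = first <;> simp [hx]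
    rw [e2, Finset.card_insert_of_notMem (Finset.notMem_erase _ _)] at hcard
    have e : rest.toFinset \ [first].toFinset = rest.toFinset.erase first := by
      ext x
      simp only [Finset.mem_sdiff, List.mem_toFinset, List.mem_singleton, Finset.mem_erase]
      tauto
    rw [e]
    push_cast at hcard ⊢
    omega
  have main := pv_loop base rest 1 (PySem.Dict.empty.insert first 1) 1 (by rw [hkeys1]; rfl)
    (le_refl 1) hcard'
  rw [hav]
  have el : ((first :: rest).length : Int) - 1 = (rest.length : Int) := by
    simp
  rw [el]
  simp only [List.foldl_cons, PySem.Dict.contains_empty, Bool.false_eq_true, if_false,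
    PySem.Dict.size_empty, beq_self_eq_true, if_true, Int.toNat_natCast,
    if_neg (by omega : ¬ base ≤ (1 : Int)), PySem.Dict.getD_insert_self, zero_mul, zero_add]
  rw [one_mul] at main
  exact main
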